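-- pv_equiv track=rewrite | github.com/azais-corentin/cmakefmt | scripts/generate_benchmark_fixture.py | _nested_if_block
-- ===== SOURCE A (Python) =====
-- from typing import Iterator
--
-- def _nested_if_block(depth: int, idx: int) -> Iterator[str]:
--     """Generate a nested if/elseif/else/endif block."""
--     indent = "  " * depth
--     conds = [
--         f"SYNTHETIC_COND_{idx}_A",
--         f'SYNTHETIC_VAR_{idx} STREQUAL "value_{idx}"',
--         f"SYNTHETIC_NUM_{idx} GREATER 100",
--         f"DEFINED SYNTHETIC_DEF_{idx}",
--         f"EXISTS ${{CMAKE_CURRENT_SOURCE_DIR}}/file_{idx}.txt",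
--         f'SYNTHETIC_LIST_{idx} MATCHES "^pattern"',
--         f"TARGET synthetic_target_{idx}",
--         f"SYNTHETIC_A_{idx} VERSION_GREATER_EQUAL 1.2.3",
--     ]
--     cond = conds[idx % len(conds)]
--     yield f"{indent}IF( {cond} )"
--     yield f'{indent}  MESSAGE(STATUS "Condition {idx} depth {depth} met"  )'
--     if depth < 4:
--         yield from _nested_if_block(depth + 1, idx * 2 + 1)
--     yield f"{indent}ELSEIF(  NOT {cond}  AND  SYNTHETIC_FALLBACK_{idx} )"
--     yield f'{indent}  message(  WARNING  "Fallback {idx} depth {depth}" )'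
--     if depth < 3:
--         yield from _nested_if_block(depth + 1, idx * 2 + 2)
--     yield f"{indent}ELSE()"
--     yield f'{indent}  MESSAGE(  AUTHOR_WARNING  "Neither condition for {idx}"  )'
--     yield f"{indent}ENDIF()"
-- ===== SOURCE B (Python) =====
-- def _nested_if_block(depth: int, idx: int):
--     """Generate a nested if/elseif/else/endif block (iterative, explicit stack)."""
--     stack = [("expand", depth, idx)]
--     while stack:
--         task = stack.pop()
--         if task[0] == "lit":
--             yield task[1]
--             continue
--         _, d, i = task
--         indent = "  " * d
--         conds = [
--             f"SYNTHETIC_COND_{i}_A",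
--             f'SYNTHETIC_VAR_{i} STREQUAL "value_{i}"',
--             f"SYNTHETIC_NUM_{i} GREATER 100",
--             f"DEFINED SYNTHETIC_DEF_{i}",
--             f"EXISTS ${{CMAKE_CURRENT_SOURCE_DIR}}/file_{i}.txt",
--             f'SYNTHETIC_LIST_{i} MATCHES "^pattern"',
--             f"TARGET synthetic_target_{i}",
--             f"SYNTHETIC_A_{i} VERSION_GREATER_EQUAL 1.2.3",
--         ]
--         cond = conds[i % len(conds)]
--         # push in reverse emission order so pops replay the original sequence
--         stack.append(("lit", f"{indent}ENDIF()"))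
--         stack.append(("lit", f'{indent}  MESSAGE(  AUTHOR_WARNING  "Neither condition for {i}"  )'))
--         stack.append(("lit", f"{indent}ELSE()"))
--         if d < 3:
--             stack.append(("expand", d + 1, i * 2 + 2))
--         stack.append(("lit", f'{indent}  message(  WARNING  "Fallback {i} depth {d}" )'))
--         stack.append(("lit", f"{indent}ELSEIF(  NOT {cond}  AND  SYNTHETIC_FALLBACK_{i} )"))
--         if d < 4:
--             stack.append(("expand", d + 1, i * 2 + 1))
--         stack.append(("lit", f'{indent}  MESSAGE(STATUS "Condition {i} depth {d} met"  )'))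
--         stack.append(("lit", f"{indent}IF( {cond} )"))
-- ===== Notes on version B (the rewrite author's own statement) =====
-- stated objective: alternative
-- what changed: Replaced the recursive generator with an iterative loop over an explicit work stack of 'literal line' / 'expand node' tasks, pushed in reverse emission order so pops replay the exact original yield sequence.
import Mathlib
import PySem

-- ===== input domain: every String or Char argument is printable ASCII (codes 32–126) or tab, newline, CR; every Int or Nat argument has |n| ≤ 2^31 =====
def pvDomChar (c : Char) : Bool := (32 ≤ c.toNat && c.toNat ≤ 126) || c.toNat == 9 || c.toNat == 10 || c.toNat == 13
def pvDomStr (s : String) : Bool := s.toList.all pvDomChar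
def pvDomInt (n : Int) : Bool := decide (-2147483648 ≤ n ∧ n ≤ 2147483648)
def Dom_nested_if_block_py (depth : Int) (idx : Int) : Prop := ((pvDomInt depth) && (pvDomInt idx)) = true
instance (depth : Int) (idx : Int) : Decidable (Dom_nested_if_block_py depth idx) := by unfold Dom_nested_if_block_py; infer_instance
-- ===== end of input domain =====

-- B replaces A's recursive generator by an iterative explicit-stack loop (same output, same cost).

-- ===== PORT A =====
-- termination facts for A's recursion, cited by name so the embedded proof terms stay tiny
theorem pvA_dec4 (depth : Int) (h : depth < 4) : (4 - (depth + 1)).toNat < (4 - depth).toNat :=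
  (Int.toNat_lt_toNat (Int.sub_pos.mpr h)).mpr (sub_lt_sub_left (lt_add_one depth) 4)
theorem pvA_dec3 (depth : Int) (h : depth < 3) : (4 - (depth + 1)).toNat < (4 - depth).toNat :=
  pvA_dec4 depth (h.trans (by norm_num))

-- literal transliteration of the recursive generator; the yielded lines are collected into a list
def nested_if_block_py (depth : Int) (idx : Int) : List String :=
  let indent : String := String.ofList (PySem.List.pyRepeat "  ".toList depth)
  let conds : List String := [
    "SYNTHETIC_COND_" ++ PySem.Int.toStr idx ++ "_A",
    "SYNTHETIC_VAR_" ++ PySem.Int.toStr idx ++ " STREQUAL \"value_" ++ PySem.Int.toStr idx ++ "\"",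
    "SYNTHETIC_NUM_" ++ PySem.Int.toStr idx ++ " GREATER 100",
    "DEFINED SYNTHETIC_DEF_" ++ PySem.Int.toStr idx,
    "EXISTS ${CMAKE_CURRENT_SOURCE_DIR}/file_" ++ PySem.Int.toStr idx ++ ".txt",
    "SYNTHETIC_LIST_" ++ PySem.Int.toStr idx ++ " MATCHES \"^pattern\"",
    "TARGET synthetic_target_" ++ PySem.Int.toStr idx,
    "SYNTHETIC_A_" ++ PySem.Int.toStr idx ++ " VERSION_GREATER_EQUAL 1.2.3"]
  let cond : String := (PySem.List.pyGet? conds (PySem.Int.mod idx (conds.length : Int))).getD ""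
  [indent ++ "IF( " ++ cond ++ " )",
   indent ++ "  MESSAGE(STATUS \"Condition " ++ PySem.Int.toStr idx ++ " depth " ++ PySem.Int.toStr depth ++ " met\"  )"]
  ++ (if depth < 4 then nested_if_block_py (depth + 1) (idx * 2 + 1) else [])
  ++ [indent ++ "ELSEIF(  NOT " ++ cond ++ "  AND  SYNTHETIC_FALLBACK_" ++ PySem.Int.toStr idx ++ " )",
      indent ++ "  message(  WARNING  \"Fallback " ++ PySem.Int.toStr idx ++ " depth " ++ PySem.Int.toStr depth ++ "\" )"]
  ++ (if depth < 3 then nested_if_block_py (depth + 1) (idx * 2 + 2) else [])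
  ++ [indent ++ "ELSE()",
      indent ++ "  MESSAGE(  AUTHOR_WARNING  \"Neither condition for " ++ PySem.Int.toStr idx ++ "\"  )",
      indent ++ "ENDIF()"]
termination_by (4 - depth).toNat
decreasing_by
  · exact pvA_dec4 depth ‹_›
  · exact pvA_dec3 depth ‹_›

-- ===== PORT B =====
-- weight of a stack task, used only as the loop's termination measure
def pvW : String ⊕ (Int × Int) → Nat
  | .inl _ => 1
  | .inr (d, _) => 10 * 3 ^ (5 - d).toNat

def pvStackW (st : List (String ⊕ (Int × Int))) : Nat := (st.map pvW).sum

-- the block of tasks Source B pushes when it pops an expand-node (d, i): the node's own lines and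
-- its child expand markers, in pop (= emission) order
def pvExpand (d : Int) (i : Int) : List (String ⊕ (Int × Int)) :=
  let indent : String := String.ofList (PySem.List.pyRepeat "  ".toList d)
  let conds : List String := [
    "SYNTHETIC_COND_" ++ PySem.Int.toStr i ++ "_A",
    "SYNTHETIC_VAR_" ++ PySem.Int.toStr i ++ " STREQUAL \"value_" ++ PySem.Int.toStr i ++ "\"",
    "SYNTHETIC_NUM_" ++ PySem.Int.toStr i ++ " GREATER 100",
    "DEFINED SYNTHETIC_DEF_" ++ PySem.Int.toStr i,
    "EXISTS ${CMAKE_CURRENT_SOURCE_DIR}/file_" ++ PySem.Int.toStr i ++ ".txt",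
    "SYNTHETIC_LIST_" ++ PySem.Int.toStr i ++ " MATCHES \"^pattern\"",
    "TARGET synthetic_target_" ++ PySem.Int.toStr i,
    "SYNTHETIC_A_" ++ PySem.Int.toStr i ++ " VERSION_GREATER_EQUAL 1.2.3"]
  let cond : String := (PySem.List.pyGet? conds (PySem.Int.mod i (conds.length : Int))).getD ""
  [.inl (indent ++ "IF( " ++ cond ++ " )"),
   .inl (indent ++ "  MESSAGE(STATUS \"Condition " ++ PySem.Int.toStr i ++ " depth " ++ PySem.Int.toStr d ++ " met\"  )")]
  ++ (if d < 4 then [.inr (d + 1, i * 2 + 1)] else [])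
  ++ [.inl (indent ++ "ELSEIF(  NOT " ++ cond ++ "  AND  SYNTHETIC_FALLBACK_" ++ PySem.Int.toStr i ++ " )"),
      .inl (indent ++ "  message(  WARNING  \"Fallback " ++ PySem.Int.toStr i ++ " depth " ++ PySem.Int.toStr d ++ "\" )")]
  ++ (if d < 3 then [.inr (d + 1, i * 2 + 2)] else [])
  ++ [.inl (indent ++ "ELSE()"),
      .inl (indent ++ "  MESSAGE(  AUTHOR_WARNING  \"Neither condition for " ++ PySem.Int.toStr i ++ "\"  )"),
      .inl (indent ++ "ENDIF()")]

-- the stack loop of Source B: pop a task; a literal is emitted, an expand node pushes pvExpand d i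
-- (list head = top of stack); the Nat fuel only makes the loop total — the starting fuel
-- pvStackW st + 1 always suffices (theorem pvRunFuel_eq below)
def pvRunFuel : Nat → List (String ⊕ (Int × Int)) → List String
  | 0, _ => []
  | _ + 1, [] => []
  | n + 1, .inl s :: rest => s :: pvRunFuel n rest
  | n + 1, .inr (d, i) :: rest => pvRunFuel n (pvExpand d i ++ rest)

def nested_if_block_py_alt (depth : Int) (idx : Int) : List String :=
  pvRunFuel (pvStackW [Sum.inr (depth, idx)] + 1) [Sum.inr (depth, idx)]

-- ===== PRECONDITION & SPEC =====
def Spec_nested_if_block_py (depth : Int) (idx : Int) (out : List String) : Prop := out = nested_if_block_py_alt depth idx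
instance (depth : Int) (idx : Int) (out : List String) : Decidable (Spec_nested_if_block_py depth idx out) := by unfold Spec_nested_if_block_py; infer_instance

-- ===== CLAIM (what is proved, stated in full; the proofs are below) =====
def Claim_equal_nested_if_block_py : Prop := ∀ (depth : Int) (idx : Int), Dom_nested_if_block_py depth idx → Spec_nested_if_block_py depth idx (nested_if_block_py depth idx)

-- ===== LEMMAS AND PROOFS =====

-- meaning of one stack task: a literal yields itself, an expand marker yields A's whole block
def pvInterp : String ⊕ (Int × Int) → List String
  | .inl s => [s]
  | .inr (d, i) => nested_if_block_py d i

theorem pvStackW_append (a b : List (String ⊕ (Int × Int))) :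
    pvStackW (a ++ b) = pvStackW a + pvStackW b := by
  simp [pvStackW]

theorem pvStackW_cons (t : String ⊕ (Int × Int)) (rest : List (String ⊕ (Int × Int))) :
    pvStackW (t :: rest) = pvW t + pvStackW rest := by
  simp [pvStackW]

theorem pvStackW_opt (c : Prop) [Decidable c] (p : Int × Int) :
    pvStackW (if c then [Sum.inr p] else []) = if c then pvW (Sum.inr p) else 0 := by
  split_ifs <;> rfl

-- weight of the generic shape of a pushed block: only the list SHAPE matters, never the strings
theorem pvStackW_shape (a b c d' e f g : String) (o1 o2 : List (String ⊕ (Int × Int))) :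
    pvStackW ([Sum.inl a, Sum.inl b] ++ o1 ++ [Sum.inl c, Sum.inl d'] ++ o2
        ++ [Sum.inl e, Sum.inl f, Sum.inl g])
      = 2 + (pvStackW o1 + (2 + (pvStackW o2 + 3))) := by
  rw [pvStackW_append, pvStackW_append, pvStackW_append, pvStackW_append]
  simp only [pvStackW, List.map_cons, List.map_nil, List.sum_cons, List.sum_nil, pvW]
  omega

-- the weight of everything a popped node pushes back
theorem pvStackW_expand (d : Int) (i : Int) :
    pvStackW (pvExpand d i)
      = 2 + ((if d < 4 then pvW (Sum.inr (d + 1, i * 2 + 1)) else 0)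
        + (2 + ((if d < 3 then pvW (Sum.inr (d + 1, i * 2 + 2)) else 0) + 3))) := by
  rw [pvExpand, pvStackW_shape, pvStackW_opt, pvStackW_opt]

theorem pvPow_succ (d : Int) (h : d < 4) : (5 - d).toNat = (5 - (d + 1)).toNat + 1 := by
  have h1 : (5 : Int) - d = (5 - (d + 1)) + 1 := by ring
  rw [h1, Int.toNat_add (by linarith) (by norm_num)]
  rfl

theorem pvPow_pos (n : Nat) : 1 ≤ 3 ^ n := Nat.one_le_pow _ _ (by omega)

-- the key arithmetic: a node's weight exceeds the total weight it pushes back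
theorem pvW_key (d : Int) :
    (if d < 4 then 10 * 3 ^ (5 - (d + 1)).toNat else 0)
      + (if d < 3 then 10 * 3 ^ (5 - (d + 1)).toNat else 0) + 7 < 10 * 3 ^ (5 - d).toNat := by
  by_cases h4 : d < 4
  · rw [if_pos h4, pvPow_succ d h4, pow_succ]
    have hx := pvPow_pos (5 - (d + 1)).toNat
    by_cases h3 : d < 3
    · rw [if_pos h3]
      generalize 3 ^ (5 - (d + 1)).toNat = x at hx ⊢
      linarith
    · rw [if_neg h3]
      generalize 3 ^ (5 - (d + 1)).toNat = x at hx ⊢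
      linarith
  · rw [if_neg h4, if_neg (fun h : d < 3 => h4 (by linarith))]
    have hx := pvPow_pos (5 - d).toNat
    generalize 3 ^ (5 - d).toNat = x at hx ⊢
    linarith

-- popping an expand node strictly shrinks the stack's weight (the loop's termination argument)
theorem pvExpand_lt (d : Int) (i : Int) (rest : List (String ⊕ (Int × Int))) :
    pvStackW (pvExpand d i ++ rest) < pvStackW (Sum.inr (d, i) :: rest) := by
  rw [pvStackW_append, pvStackW_cons, pvStackW_expand]
  have h := pvW_key d
  simp only [pvW] at h ⊢
  generalize 3 ^ (5 - (d + 1)).toNat = x at h ⊢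
  generalize 3 ^ (5 - d).toNat = y at h ⊢
  split_ifs at h ⊢ <;> linarith

-- the pushed block of a node expands, under pvInterp, to exactly A's block for that node
theorem pvExpand_flatMap (d : Int) (i : Int) :
    (pvExpand d i).flatMap pvInterp = nested_if_block_py d i := by
  rw [nested_if_block_py.eq_def]
  simp only [pvExpand]
  split_ifs <;> simp [pvInterp]

-- loop invariant: with fuel beyond the stack's weight, running the stack yields the
-- concatenated meanings of its tasks (each step consumes one fuel and at least one weight)
theorem pvRunFuel_eq : ∀ (n : Nat) (st : List (String ⊕ (Int × Int))), pvStackW st < n →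
    pvRunFuel n st = st.flatMap pvInterp := by
  intro n
  induction n with
  | zero => intro st h; exact absurd h (Nat.not_lt_zero _)
  | succ m ih =>
    intro st h
    cases st with
    | nil => simp [pvRunFuel]
    | cons t rest =>
      cases t with
      | inl s =>
        rw [pvStackW_cons] at h
        simp only [pvW] at h
        rw [pvRunFuel, ih rest (by omega)]
        simp [pvInterp]
      | inr p =>
        obtain ⟨d, i⟩ := p
        have hlt := pvExpand_lt d i rest
        rw [pvRunFuel, ih _ (by omega)]
        simp [List.flatMap_append, pvExpand_flatMap, pvInterp]

-- ===== VERDICT (by name: the statement is the Claim_ definition above) =====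
theorem nested_if_block_py_spec : Claim_equal_nested_if_block_py := by
  intro depth idx _
  unfold Spec_nested_if_block_py nested_if_block_py_alt
  rw [pvRunFuel_eq _ _ (Nat.lt_succ_self _)]
  simp [pvInterp]
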